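-- pv_equiv track=rewrite | github.com/doforone/xinfadi | inc/fun.py | at_acc
-- ===== SOURCE A (Python) =====
-- def at_acc(atacc):
--      aaa="0123456789abcdefghijklmnopqrstuvwxyz"
--      if (pos:=atacc.find("@"))>-1:
--           pos+=1
--           pos_l=pos
--           lenn=len(atacc)
--           while pos<lenn:
--                if aaa.find(atacc[pos])>-1:
--                     pos+=1
--                else:
--                     break
--           return atacc[pos_l:pos]
--      else:
--           return ""
-- ===== SOURCE B (Python) =====
-- import re
--
-- def at_acc(atacc):
--     m = re.search(r'@([0-9a-z]*)', atacc)
--     return m.group(1) if m else ''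
-- ===== Notes on version B (the rewrite author's own statement) =====
-- stated objective: idiomatic
-- what changed: Replaced the manual find/index while-loop and slice with a single regular-expression search '@([0-9a-z]*)' that captures the token directly.
import Mathlib
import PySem

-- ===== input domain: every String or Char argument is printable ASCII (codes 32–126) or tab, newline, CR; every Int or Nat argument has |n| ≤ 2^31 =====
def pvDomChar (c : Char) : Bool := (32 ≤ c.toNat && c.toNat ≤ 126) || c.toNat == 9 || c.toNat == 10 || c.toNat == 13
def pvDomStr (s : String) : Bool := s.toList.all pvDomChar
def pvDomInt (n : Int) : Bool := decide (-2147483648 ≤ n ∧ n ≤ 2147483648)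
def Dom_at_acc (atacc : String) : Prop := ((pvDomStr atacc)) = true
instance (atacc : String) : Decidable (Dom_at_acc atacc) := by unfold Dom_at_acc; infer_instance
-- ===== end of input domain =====

-- B replaces A's manual find/while-index scan and slice by a single regex search '@([0-9a-z]*)'
-- (ported as dropWhile-to-'@' then takeWhile over the character class); objective: idiomatic.

-- ===== PORT A =====
-- the while-loop of A: advance pos while atacc[pos] is found in aaa, stop at the first other char or at the end
def at_acc_loop (s : List Char) (pos : Nat) : Nat :=
  if h : pos < s.length then
    if PySem.Chars.find "0123456789abcdefghijklmnopqrstuvwxyz".toList [s[pos]] > -1 then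
      at_acc_loop s (pos + 1)
    else pos
  else pos
termination_by s.length - pos
decreasing_by omega

def at_acc (atacc : String) : String :=
  if PySem.Str.find atacc "@" > -1 then
    -- pos += 1; pos_l = pos; the loop; return atacc[pos_l:pos]  (find ≥ 0 here, so .toNat is exact)
    PySem.Str.slice atacc (some (PySem.Str.find atacc "@" + 1))
      (some ((at_acc_loop atacc.toList (PySem.Str.find atacc "@" + 1).toNat : Nat) : Int))
  else ""

-- ===== PORT B =====
-- the regex character class [0-9a-z]
def isTok (c : Char) : Bool := (48 ≤ c.toNat && c.toNat ≤ 57) || (97 ≤ c.toNat && c.toNat ≤ 122)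

-- re.search(r'@([0-9a-z]*)', atacc): first '@' (dropWhile), then the greedy run of the class (takeWhile)
def at_acc_alt (atacc : String) : String :=
  match atacc.toList.dropWhile (fun c => c ≠ '@') with
  | [] => ""
  | _ :: rest => String.ofList (rest.takeWhile isTok)

-- ===== PRECONDITION & SPEC =====
def Spec_at_acc (atacc : String) (out : String) : Prop := out = at_acc_alt atacc
instance (atacc : String) (out : String) : Decidable (Spec_at_acc atacc out) := by unfold Spec_at_acc; infer_instance

-- ===== CLAIM (what is proved, stated in full; the proofs are below) =====
def Claim_equal_at_acc : Prop := ∀ (atacc : String), Dom_at_acc atacc → Spec_at_acc atacc (at_acc atacc)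

-- ===== LEMMAS AND PROOFS =====

theorem mem_tok_iff (c : Char) :
    c ∈ "0123456789abcdefghijklmnopqrstuvwxyz".toList ↔ isTok c = true := by
  have hinj : ∀ a b : Char, a.toNat = b.toNat → a = b := by
    intro a b hab
    exact Char.ext (UInt32.toNat_inj.mp hab)
  have hmap : c ∈ "0123456789abcdefghijklmnopqrstuvwxyz".toList ↔
      c.toNat ∈ ("0123456789abcdefghijklmnopqrstuvwxyz".toList.map Char.toNat) := by
    constructor
    · intro h; exact List.mem_map_of_mem h
    · intro h
      rcases List.mem_map.mp h with ⟨d, hd, hdc⟩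
      exact (hinj d c hdc) ▸ hd
  have heval : "0123456789abcdefghijklmnopqrstuvwxyz".toList.map Char.toNat =
      [48,49,50,51,52,53,54,55,56,57,97,98,99,100,101,102,103,104,105,106,107,108,109,110,111,112,113,114,115,116,117,118,119,120,121,122] := by decide
  rw [hmap, heval]
  simp only [List.mem_cons, List.not_mem_nil, or_false, isTok, Bool.or_eq_true,
    Bool.and_eq_true, decide_eq_true_iff]
  omega

theorem find_tok_iff (c : Char) :
    (PySem.Chars.find "0123456789abcdefghijklmnopqrstuvwxyz".toList [c] > -1) ↔ isTok c = true := by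
  rw [← mem_tok_iff]
  have h0 : (PySem.Chars.find "0123456789abcdefghijklmnopqrstuvwxyz".toList [c] > -1) ↔
      0 ≤ PySem.Chars.find "0123456789abcdefghijklmnopqrstuvwxyz".toList [c] := by omega
  rw [h0, PySem.Chars.find_nonneg_iff]
  constructor
  · intro h
    exact List.singleton_sublist.mp h.sublist
  · intro h
    obtain ⟨s, t, heq⟩ := List.append_of_mem h
    rw [heq]
    exact ⟨s, t, by simp⟩

theorem loop_eq (s : List Char) (r : List Char) :
    ∀ (pos : Nat), s.drop pos = r →
      at_acc_loop s pos = pos + (r.takeWhile isTok).length := by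
  induction r with
  | nil =>
    intro pos h
    have hl : s.length ≤ pos := by
      by_contra hc
      have := List.drop_eq_nil_iff.mp h
      omega
    unfold at_acc_loop
    rw [dif_neg (by omega)]
    simp
  | cons c r' ih =>
    intro pos h
    have hp : pos < s.length := by
      by_contra hc
      rw [List.drop_eq_nil_of_le (by omega)] at h
      simp at h
    have hget : s[pos] = c := by
      have h0 : (s.drop pos)[0]'(by rw [h]; simp) = c := by
        simp [h]
      rw [List.getElem_drop] at h0
      simpa using h0
    have hdrop : s.drop (pos + 1) = r' := by
      have : s.drop (pos + 1) = (s.drop pos).drop 1 := by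
        rw [List.drop_drop]
      rw [this, h]
      simp
    unfold at_acc_loop
    rw [dif_pos hp, hget]
    by_cases ht : isTok c = true
    · rw [if_pos ((find_tok_iff c).mpr ht), ih (pos + 1) hdrop,
        List.takeWhile_cons_of_pos ht]
      simp
      omega
    · rw [if_neg (fun hc => ht ((find_tok_iff c).mp hc)),
        List.takeWhile_cons_of_neg (by simpa using ht)]
      simp

-- dropWhile (· ≠ '@') reaches exactly the first occurrence of '@'
theorem dropWhile_eq_drop (l : List Char) (k : Nat) (hk : k < l.length)
    (hat : l[k] = '@') (hbefore : ∀ i (h : i < k), l[i]'(by omega) ≠ '@') :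
    l.dropWhile (fun c => c ≠ '@') = l.drop k := by
  induction l generalizing k with
  | nil => simp at hk
  | cons c l' ih =>
    cases k with
    | zero =>
      simp at hat
      subst hat
      simp
    | succ k' =>
      have hc : c ≠ '@' := by
        have := hbefore 0 (by omega)
        simpa using this
      rw [List.dropWhile_cons_of_pos (by simpa using hc)]
      simp only [List.drop_succ_cons]
      exact ih k' (by simpa using hk) (by simpa using hat)
        (fun i h => by
          have := hbefore (i + 1) (by omega)
          simpa using this)

theorem at_acc_eq_alt (atacc : String) : at_acc atacc = at_acc_alt atacc := by
  unfold at_acc at_acc_alt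
  have he : PySem.Str.find atacc "@" = PySem.Chars.find atacc.toList ['@'] := by
    have : ("@" : String).toList = ['@'] := rfl
    rw [← this]; simp
  by_cases hf : PySem.Str.find atacc "@" > -1
  · rw [if_pos hf]
    have hnn : 0 ≤ PySem.Chars.find atacc.toList ['@'] := by omega
    obtain ⟨k, hk⟩ : ∃ k : Nat, PySem.Chars.find atacc.toList ['@'] = (k : Int) :=
      ⟨_, (Int.toNat_of_nonneg hnn).symm⟩
    obtain ⟨hpre, hmin⟩ := PySem.Chars.find_spec hnn
    rw [hk, Int.toNat_natCast] at hpre hmin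
    have hfind : PySem.Str.find atacc "@" = (k : Int) := by rw [he, hk]
    obtain ⟨tl, htl⟩ := hpre
    have hlen := congrArg List.length htl
    rw [List.length_append, List.length_drop] at hlen
    have hone : (['@'] : List Char).length = 1 := rfl
    rw [hone] at hlen
    have hklt : k < atacc.toList.length := by omega
    have hat : atacc.toList[k] = '@' := by
      have h0 : (atacc.toList.drop k)[0]? = some '@' := by
        rw [← htl]; rfl
      rw [List.getElem?_drop, Nat.add_zero, List.getElem?_eq_getElem hklt] at h0
      simpa using h0
    have hbefore : ∀ i (h : i < k), atacc.toList[i]'(by omega) ≠ '@' := by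
      intro i hi hcontra
      apply hmin i hi
      exact ⟨atacc.toList.drop (i + 1), by
        rw [← hcontra]
        exact List.getElem_cons_drop (as := atacc.toList) (i := i) (by omega)⟩
    have hdw := dropWhile_eq_drop atacc.toList k hklt hat hbefore
    have hdropk : atacc.toList.drop k = '@' :: atacc.toList.drop (k + 1) := by
      rw [← hat]
      exact (List.getElem_cons_drop (as := atacc.toList) (i := k) hklt).symm
    rw [hdw, hdropk]
    have hloop := loop_eq atacc.toList (atacc.toList.drop (k + 1)) (k + 1) rfl
    have htonat : (PySem.Str.find atacc "@" + 1).toNat = k + 1 := by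
      rw [hfind]; omega
    apply String.toList_inj.mp
    rw [PySem.Str.toList_slice, PySem.Chars.slice_eq_listSlice, String.toList_ofList,
      htonat, hloop, hfind]
    have hcast : ((k : Int) + 1) = ((k + 1 : Nat) : Int) := by push_cast; ring
    have hcast2 : ((k + 1 + ((atacc.toList.drop (k + 1)).takeWhile isTok).length : Nat) : Int) =
        ((k + 1 : Nat) : Int) + ((((atacc.toList.drop (k + 1)).takeWhile isTok).length : Nat) : Int) := by
      push_cast; ring
    rw [hcast, hcast2, PySem.List.slice_natCast_add]
    exact (List.prefix_iff_eq_take.mp (List.takeWhile_prefix _)).symm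
  · rw [if_neg hf]
    have hneg : PySem.Chars.find atacc.toList ['@'] = -1 := by
      have hge : -1 ≤ PySem.Chars.find atacc.toList ['@'] :=
        PySem.Chars.neg_one_le_find _ _
      omega
    have hnotin : ¬ ['@'] <:+: atacc.toList :=
      (PySem.Chars.find_eq_neg_one_iff _ _).mp hneg
    have hnomem : '@' ∉ atacc.toList := by
      intro hmem
      apply hnotin
      obtain ⟨s, u, heq⟩ := List.append_of_mem hmem
      rw [heq]
      exact ⟨s, u, by simp⟩
    have hdw : atacc.toList.dropWhile (fun c => c ≠ '@') = [] := by
      rw [List.dropWhile_eq_nil_iff]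
      intro x hx
      simp only [ne_eq, decide_eq_true_eq]
      intro hxe
      exact hnomem (hxe ▸ hx)
    rw [hdw]

-- ===== VERDICT (by name: the statement is the Claim_ definition above) =====
theorem at_acc_spec : Claim_equal_at_acc := by
  intro atacc _
  unfold Spec_at_acc
  exact at_acc_eq_alt atacc
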